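-- pv_equiv track=rewrite | github.com/Akshaysachu007/ai_interview_platform | ai-interview-app/backend/python/extract_resume.py | extract_bio
-- ===== SOURCE A (Python) =====
-- def extract_bio(text):
--     """Extract summary/bio section from resume"""
--     # Common bio section headers
--     bio_headers = ['summary', 'profile', 'objective', 'about', 'bio']
--
--     lines = text.split('\n')
--     bio_text = ""
--     capturing = False
--
--     for i, line in enumerate(lines):
--         line_lower = line.lower().strip()
--
--         # Check if this line is a bio header
--         if any(header in line_lower for header in bio_headers):
--             capturing = True
--             continue
--
--         # Stop capturing at next section
--         if capturing and line.isupper() and len(line) > 5: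
--             break
--
--         # Capture bio lines
--         if capturing and line.strip():
--             bio_text += line.strip() + " "
--
--             # Limit bio to 3-4 lines
--             if len(bio_text) > 300:
--                 break
--
--     # If no bio section found, use first few lines after name
--     if not bio_text and len(lines) > 2:
--         bio_text = " ".join(lines[2:5])
--
--     return bio_text.strip()[:500]  # Max 500 chars
-- ===== SOURCE B (Python) =====
-- def extract_bio(text):
--     """Extract summary/bio section from resume"""
--     headers = ['summary', 'profile', 'objective', 'about', 'bio']
--
--     def is_hdr(line):
--         s = line.lower().strip()
--         return any(h in s for h in headers)
--
--     lines = text.split('\n')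
--     start = next((i for i, l in enumerate(lines) if is_hdr(l)), None)
--     parts = []
--     if start is not None:
--         # staged pipeline: drop header lines, truncate at the first upper-case
--         # section break, strip / drop blanks, then apply the 300-char prefix cutoff
--         tail = [l for l in lines[start + 1:] if not is_hdr(l)]
--         stop = next((i for i, l in enumerate(tail) if l.isupper() and len(l) > 5),
--                     len(tail))
--         parts = [s for s in (l.strip() for l in tail[:stop]) if s]
--         total = 0
--         cut = 0
--         for p in parts:
--             total += len(p) + 1
--             cut += 1
--             if total > 300:
--                 break
--         parts = parts[:cut]
--     if not parts and len(lines) > 2: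
--         return " ".join(lines[2:5]).strip()[:500]
--     return " ".join(parts)[:500]
-- ===== Notes on version B (the rewrite author's own statement) =====
-- stated objective: alternative
-- what changed: A interleaves everything in one capturing-flag scan with continue/break that grows a bio string; B is a staged pipeline: find the first header index, filter out header lines, truncate the tail at the first upper-case break index, strip and drop blanks by comprehensions, apply the 300-char cutoff as a prefix-length count, and join once at the end.
import Mathlib
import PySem

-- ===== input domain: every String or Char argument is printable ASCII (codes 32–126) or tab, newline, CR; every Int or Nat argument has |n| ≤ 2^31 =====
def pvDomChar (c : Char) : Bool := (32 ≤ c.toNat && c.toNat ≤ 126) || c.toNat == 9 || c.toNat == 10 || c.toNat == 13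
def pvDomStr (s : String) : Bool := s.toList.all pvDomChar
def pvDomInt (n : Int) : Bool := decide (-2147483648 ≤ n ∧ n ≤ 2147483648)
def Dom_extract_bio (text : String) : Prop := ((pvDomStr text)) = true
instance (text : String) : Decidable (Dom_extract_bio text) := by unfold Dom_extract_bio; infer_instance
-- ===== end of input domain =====

-- B replaces A's single capturing-flag scan by a staged pipeline (filter out header
-- lines, truncate at the first upper-case break index, strip/drop blanks, prefix-length
-- cutoff, one final join) — alternative decomposition, same cost.

-- shared primitive ports (both Pythons use the identical expressions / built-ins)
-- 'any(header in line.lower().strip() for header in bio_headers)'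
def pvIsHeaderLine (line : List Char) : Bool :=
  ["summary".toList, "profile".toList, "objective".toList, "about".toList, "bio".toList].any
    (fun h => PySem.Chars.isIn h (PySem.Chars.strip (PySem.Chars.lower line)))

-- hand port of str.isupper(): some cased char, and no cased char is lowercase.
-- Exact on the ASCII domain, where the cased characters are exactly a-z / A-Z.
def pvIsupper (line : List Char) : Bool :=
  line.any (fun c => PySem.Chars.isupper c || PySem.Chars.islower c) &&
  line.all (fun c => !PySem.Chars.islower c)

-- ===== PORT A =====
def pvLoopA : List (List Char) → Bool → List Char → List Char
  | [], _, bio => bio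
  | line :: rest, cap, bio =>
    if pvIsHeaderLine line then pvLoopA rest true bio
    else if cap && pvIsupper line && decide (5 < line.length) then bio
    else if cap && !(PySem.Chars.strip line).isEmpty then
      let bio' := bio ++ PySem.Chars.strip line ++ [' ']
      if 300 < bio'.length then bio' else pvLoopA rest cap bio'
    else pvLoopA rest cap bio

def extract_bio (text : String) : String :=
  let lines := PySem.Chars.splitOn text.toList ['\n']
  let bio := pvLoopA lines false []
  let bio2 := if bio.isEmpty && decide (2 < lines.length)
              then PySem.Chars.join [' '] (PySem.List.slice lines (some 2) (some 5))
              else bio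
  String.ofList ((PySem.Chars.strip bio2).take 500)

-- ===== PORT B =====
-- B's final for-loop over parts: it only computes the cut index (running total of
-- len(p)+1, stopping once it exceeds 300); parts[:cut] is List.take (0 ≤ cut ≤ len)
def pvCutIdx : List (List Char) → Nat → Nat → Nat
  | [], _, cut => cut
  | p :: ps, total, cut =>
    let total' := total + p.length + 1
    if 300 < total' then cut + 1 else pvCutIdx ps total' (cut + 1)

def extract_bio_alt (text : String) : String :=
  let lines := PySem.Chars.splitOn text.toList ['\n']
  let parts : List (List Char) :=
    match lines.findIdx? pvIsHeaderLine with   -- next((i for i,l in enumerate(lines) if is_hdr(l)), None)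
    | none => []
    | some start =>
      let tail := (lines.drop (start + 1)).filter (fun l => !pvIsHeaderLine l)
      -- next((i ...), len(tail)); tail[:stop] with 0 ≤ stop ≤ len(tail) is take
      let stop := (tail.findIdx? (fun l => pvIsupper l && decide (5 < l.length))).getD tail.length
      let parts0 := ((tail.take stop).map PySem.Chars.strip).filter (fun s => !s.isEmpty)
      parts0.take (pvCutIdx parts0 0 0)
  if parts.isEmpty && decide (2 < lines.length) then
    String.ofList ((PySem.Chars.strip
      (PySem.Chars.join [' '] (PySem.List.slice lines (some 2) (some 5)))).take 500)
  else
    String.ofList ((PySem.Chars.join [' '] parts).take 500)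

-- ===== PRECONDITION & SPEC =====
def Spec_extract_bio (text : String) (out : String) : Prop := out = extract_bio_alt text
instance (text : String) (out : String) : Decidable (Spec_extract_bio text out) := by unfold Spec_extract_bio; infer_instance

-- ===== CLAIM (what is proved, stated in full; the proofs are below) =====
def Claim_equal_extract_bio : Prop := ∀ (text : String), Dom_extract_bio text → Spec_extract_bio text (extract_bio text)

-- ===== LEMMAS AND PROOFS =====

-- A's bio string = a parts list with a trailing space after each part
def pvConcatTS (parts : List (List Char)) : List Char :=
  (parts.map (· ++ [' '])).flatten

-- parts appearing in the intermediate lists: stripped and nonempty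
def pvGoodPart (p : List Char) : Prop := PySem.Chars.strip p = p ∧ p ≠ []

-- intermediate stage 1: A's capturing loop, restated with an explicit parts list
def pvCollectB : List (List Char) → List (List Char) → Nat → List (List Char)
  | [], parts, _ => parts
  | line :: rest, parts, total =>
    if pvIsHeaderLine line then pvCollectB rest parts total
    else if pvIsupper line && decide (5 < line.length) then parts
    else
      let s := PySem.Chars.strip line
      if !s.isEmpty then
        let parts' := parts ++ [s]
        let total' := total + s.length + 1
        if 300 < total' then parts' else pvCollectB rest parts' total'
      else pvCollectB rest parts total

-- stage 2: header lines filtered away up front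
def pvCollectB2 : List (List Char) → List (List Char) → Nat → List (List Char)
  | [], parts, _ => parts
  | line :: rest, parts, total =>
    if pvIsupper line && decide (5 < line.length) then parts
    else
      let s := PySem.Chars.strip line
      if !s.isEmpty then
        let parts' := parts ++ [s]
        let total' := total + s.length + 1
        if 300 < total' then parts' else pvCollectB2 rest parts' total'
      else pvCollectB2 rest parts total

-- stage 3: the break turned into a take at the first break index
def pvCollectB3 : List (List Char) → List (List Char) → Nat → List (List Char)
  | [], parts, _ => parts
  | line :: rest, parts, total =>
    let s := PySem.Chars.strip line
    if !s.isEmpty then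
      let parts' := parts ++ [s]
      let total' := total + s.length + 1
      if 300 < total' then parts' else pvCollectB3 rest parts' total'
    else pvCollectB3 rest parts total

-- stage 4: stripping and blank-dropping hoisted out
def pvCollectB4 : List (List Char) → List (List Char) → Nat → List (List Char)
  | [], parts, _ => parts
  | s :: rest, parts, total =>
    let parts' := parts ++ [s]
    let total' := total + s.length + 1
    if 300 < total' then parts' else pvCollectB4 rest parts' total'

lemma pvWsd_shape (l : List Char) :
    List.dropWhile PySem.Chars.isspace l = [] ∨
    ∃ a as, List.dropWhile PySem.Chars.isspace l = a :: as ∧ PySem.Chars.isspace a = false := by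
  induction l with
  | nil => left; rfl
  | cons x xs ih =>
    by_cases hx : PySem.Chars.isspace x = true
    · rw [List.dropWhile_cons_of_pos hx]; exact ih
    · right
      exact ⟨x, xs, List.dropWhile_cons_of_neg hx, by simpa using hx⟩

lemma pvDropWhile_idem (l : List Char) :
    List.dropWhile PySem.Chars.isspace (List.dropWhile PySem.Chars.isspace l)
      = List.dropWhile PySem.Chars.isspace l := by
  rcases pvWsd_shape l with h | ⟨a, as, h, ha⟩
  · rw [h]; rfl
  · rw [h, List.dropWhile_cons_of_neg (by simp [ha])]

lemma pvRstrip_prefix (l : List Char) : PySem.Chars.rstrip l <+: l := by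
  have h : List.dropWhile PySem.Chars.isspace l.reverse <:+ l.reverse := List.dropWhile_suffix _
  have h2 := (List.reverse_prefix (l₁ := List.dropWhile PySem.Chars.isspace l.reverse)
    (l₂ := l.reverse)).2 h
  simpa [PySem.Chars.rstrip] using h2

lemma pvRstrip_idem (l : List Char) :
    PySem.Chars.rstrip (PySem.Chars.rstrip l) = PySem.Chars.rstrip l := by
  simp only [PySem.Chars.rstrip, List.reverse_reverse]
  rw [pvDropWhile_idem]

lemma pvStrip_idem (l : List Char) :
    PySem.Chars.strip (PySem.Chars.strip l) = PySem.Chars.strip l := by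
  have hls : PySem.Chars.lstrip (PySem.Chars.strip l) = PySem.Chars.strip l := by
    simp only [PySem.Chars.strip, PySem.Chars.lstrip]
    rcases pvWsd_shape l with h | ⟨a, as, h, ha⟩
    · rw [h]; rfl
    · rw [h]
      have hpre : PySem.Chars.rstrip (a :: as) <+: a :: as := pvRstrip_prefix _
      rcases hr : PySem.Chars.rstrip (a :: as) with _ | ⟨c, cs⟩
      · rfl
      · rw [hr] at hpre
        obtain ⟨t, ht⟩ := hpre
        have hca : c = a := by
          have h3 := congrArg (List.head? ·) ht
          simpa using h3
        exact List.dropWhile_cons_of_neg (by simp [hca, ha])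
  rw [PySem.Chars.strip, hls]
  show PySem.Chars.rstrip (PySem.Chars.rstrip (PySem.Chars.lstrip l)) = _
  rw [pvRstrip_idem]
  rfl

lemma pvGood_lstrip {p : List Char} (h : pvGoodPart p) : PySem.Chars.lstrip p = p := by
  obtain ⟨hs, hne⟩ := h
  have hsuf : PySem.Chars.lstrip p <:+ p := List.dropWhile_suffix _
  have hlen1 : (PySem.Chars.lstrip p).length ≤ p.length := hsuf.length_le
  have hlen2 : p.length ≤ (PySem.Chars.lstrip p).length := by
    calc p.length = (PySem.Chars.strip p).length := by rw [hs]
      _ ≤ (PySem.Chars.lstrip p).length := (pvRstrip_prefix _).length_le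
  exact hsuf.eq_of_length (le_antisymm hlen1 hlen2)

lemma pvGood_rstrip {p : List Char} (h : pvGoodPart p) : PySem.Chars.rstrip p = p := by
  have hs := h.1
  rwa [PySem.Chars.strip, pvGood_lstrip h] at hs

lemma pvGood_head {p : List Char} (h : pvGoodPart p) :
    ∃ a as, p = a :: as ∧ PySem.Chars.isspace a = false := by
  rcases pvWsd_shape p with hw | ⟨a, as, hw, ha⟩
  · exact absurd (by rw [← pvGood_lstrip h]; exact hw) h.2
  · exact ⟨a, as, by rw [← pvGood_lstrip h]; exact hw, ha⟩

lemma pvLstrip_append {p : List Char} (h : pvGoodPart p) (rest : List Char) :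
    PySem.Chars.lstrip (p ++ rest) = p ++ rest := by
  obtain ⟨a, as, hp, ha⟩ := pvGood_head h
  rw [hp]
  exact List.dropWhile_cons_of_neg (by simp [ha])

lemma pvRstrip_append (l1 l2 : List Char) (h : PySem.Chars.rstrip l2 ≠ []) :
    PySem.Chars.rstrip (l1 ++ l2) = l1 ++ PySem.Chars.rstrip l2 := by
  have hne : List.dropWhile PySem.Chars.isspace l2.reverse ≠ [] := by
    intro he
    apply h
    simp only [PySem.Chars.rstrip, he, List.reverse_nil]
  simp only [PySem.Chars.rstrip]
  rw [List.reverse_append, List.dropWhile_append,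
    if_neg (by simpa [List.isEmpty_iff] using hne), List.reverse_append, List.reverse_reverse]

lemma pvRstrip_space {p : List Char} (h : pvGoodPart p) :
    PySem.Chars.rstrip (p ++ [' ']) = p := by
  simp only [PySem.Chars.rstrip]
  rw [List.reverse_append]
  have hsp : PySem.Chars.isspace ' ' = true := by decide
  simp only [List.reverse_cons, List.reverse_nil, List.nil_append, List.cons_append,
    List.dropWhile_cons_of_pos hsp, List.nil_append]
  have hr := pvGood_rstrip h
  simp only [PySem.Chars.rstrip] at hr
  exact hr

lemma pvConcatTS_cons (p : List Char) (ps : List (List Char)) :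
    pvConcatTS (p :: ps) = p ++ ([' '] ++ pvConcatTS ps) := by
  simp [pvConcatTS]

lemma pvConcatTS_append_singleton (parts : List (List Char)) (s : List Char) :
    pvConcatTS (parts ++ [s]) = pvConcatTS parts ++ (s ++ [' ']) := by
  simp [pvConcatTS]

lemma pvLength_concatTS_append (parts : List (List Char)) (s : List Char) :
    (pvConcatTS (parts ++ [s])).length = (pvConcatTS parts).length + s.length + 1 := by
  rw [pvConcatTS_append_singleton]; simp; omega

lemma pvStrip_concatTS (parts : List (List Char)) (h : ∀ p ∈ parts, pvGoodPart p) :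
    PySem.Chars.strip (pvConcatTS parts) = PySem.Chars.join [' '] parts := by
  induction parts with
  | nil =>
    simp [pvConcatTS, PySem.Chars.join, PySem.Chars.strip, PySem.Chars.lstrip,
      PySem.Chars.rstrip, List.intercalate]
  | cons p ps ih =>
    have hp : pvGoodPart p := h p (by simp)
    have hps : ∀ q ∈ ps, pvGoodPart q := fun q hq => h q (by simp [hq])
    rw [pvConcatTS_cons, PySem.Chars.strip, pvLstrip_append hp]
    cases ps with
    | nil =>
      show PySem.Chars.rstrip (p ++ ([' '] ++ pvConcatTS [])) = _
      have h0 : pvConcatTS [] = [] := rfl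
      rw [h0, List.append_nil, pvRstrip_space hp]
      simp [PySem.Chars.join, List.intercalate]
    | cons q qs =>
      have hq : pvGoodPart q := hps q (by simp)
      have ihe := ih hps
      have hls : PySem.Chars.lstrip (pvConcatTS (q :: qs)) = pvConcatTS (q :: qs) := by
        rw [pvConcatTS_cons]
        exact pvLstrip_append hq _
      have hrs : PySem.Chars.rstrip (pvConcatTS (q :: qs)) = PySem.Chars.join [' '] (q :: qs) := by
        rw [← ihe, PySem.Chars.strip, hls]
      have hjoin_ne : PySem.Chars.join [' '] (q :: qs) ≠ [] := by
        cases qs with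
        | nil => simpa [PySem.Chars.join, List.intercalate] using hq.2
        | cons r rs => simp [PySem.Chars.join, List.intercalate]
      rw [show (p ++ ([' '] ++ pvConcatTS (q :: qs))) = (p ++ [' ']) ++ pvConcatTS (q :: qs) by
            simp,
        pvRstrip_append _ _ (by rw [hrs]; exact hjoin_ne), hrs]
      simp [PySem.Chars.join, List.intercalate]

lemma pvConcatTS_empty_iff (parts : List (List Char)) :
    (pvConcatTS parts).isEmpty = parts.isEmpty := by
  cases parts with
  | nil => rfl
  | cons p ps => rw [pvConcatTS_cons]; simp

-- A's capturing loop = the explicit parts-list loop pvCollectB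
lemma pvInv (ls : List (List Char)) (parts : List (List Char)) :
    pvLoopA ls true (pvConcatTS parts)
      = pvConcatTS (pvCollectB ls parts (pvConcatTS parts).length) := by
  induction ls generalizing parts with
  | nil => simp [pvLoopA, pvCollectB]
  | cons line rest ih =>
    by_cases hh : pvIsHeaderLine line = true
    · simp only [pvLoopA, pvCollectB, hh, if_pos]
      exact ih parts
    · simp only [pvLoopA, pvCollectB, hh, Bool.false_eq_true, Bool.true_and,
        if_false]
      by_cases hu : (pvIsupper line && decide (5 < line.length)) = true
      · simp [hu]
      · simp only [hu, Bool.false_eq_true, if_false]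
        by_cases hs : (PySem.Chars.strip line).isEmpty = true
        · rw [if_neg (by simp [hs]), if_neg (by simp [hs])]
          exact ih parts
        · have hs2 : (!(PySem.Chars.strip line).isEmpty) = true := by simp [hs]
          simp only [hs2, if_pos]
          have heq : pvConcatTS parts ++ PySem.Chars.strip line ++ [' ']
              = pvConcatTS (parts ++ [PySem.Chars.strip line]) := by
            rw [pvConcatTS_append_singleton, List.append_assoc]
          rw [heq]
          have hlen := pvLength_concatTS_append parts (PySem.Chars.strip line)
          by_cases h300 : 300 < (pvConcatTS (parts ++ [PySem.Chars.strip line])).length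
          · rw [if_pos h300, if_pos (by omega)]
          · rw [if_neg h300, if_neg (by omega), ih, pvLength_concatTS_append]

-- A's whole loop from the initial state, via the first header index
lemma pvMain (lines : List (List Char)) :
    pvLoopA lines false []
      = pvConcatTS (match lines.findIdx? pvIsHeaderLine with
          | none => []
          | some start => pvCollectB (lines.drop (start + 1)) [] 0) := by
  induction lines with
  | nil => simp [pvLoopA, pvConcatTS]
  | cons line rest ih =>
    rw [List.findIdx?_cons]
    by_cases hh : pvIsHeaderLine line = true
    · have h1 : pvLoopA (line :: rest) false [] = pvLoopA rest true [] := by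
        simp [pvLoopA, hh]
      have h2 := pvInv rest []
      have h0 : pvConcatTS [] = [] := rfl
      rw [h0] at h2
      simp only [hh, if_true, h1, h2]
      rfl
    · have h1 : pvLoopA (line :: rest) false [] = pvLoopA rest false [] := by
        simp [pvLoopA, hh]
      rw [if_neg (by simp [hh]), h1, ih]
      cases hf : rest.findIdx? pvIsHeaderLine with
      | none => simp
      | some i => simp [List.drop_succ_cons]

-- stage 1 → 2: filtering header lines up front
lemma pvP1 (ls : List (List Char)) (parts : List (List Char)) (t : Nat) :
    pvCollectB ls parts t = pvCollectB2 (ls.filter (fun l => !pvIsHeaderLine l)) parts t := by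
  induction ls generalizing parts t with
  | nil => rfl
  | cons line rest ih =>
    by_cases hh : pvIsHeaderLine line = true
    · rw [List.filter_cons_of_neg (by simp [hh])]
      simp only [pvCollectB, hh, if_true]
      exact ih parts t
    · rw [List.filter_cons_of_pos (by simp [hh])]
      simp only [pvCollectB, pvCollectB2, hh, Bool.false_eq_true, if_false]
      split_ifs with h1 h2 h3
      · rfl
      · rfl
      · exact ih _ _
      · exact ih _ _

-- stage 2 → 3: the upper-case break turned into a take at the first break index
lemma pvP2 (ls : List (List Char)) (parts : List (List Char)) (t : Nat) :
    pvCollectB2 ls parts t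
      = pvCollectB3
          (ls.take ((ls.findIdx? (fun l => pvIsupper l && decide (5 < l.length))).getD ls.length))
          parts t := by
  induction ls generalizing parts t with
  | nil => rfl
  | cons line rest ih =>
    rw [List.findIdx?_cons]
    by_cases hu : (pvIsupper line && decide (5 < line.length)) = true
    · simp only [hu, if_pos, Option.getD_some, List.take_zero]
      simp [pvCollectB2, pvCollectB3, hu]
    · have htake : ((if pvIsupper line && decide (5 < line.length) then some 0
          else (rest.findIdx? (fun l => pvIsupper l && decide (5 < l.length))).map (· + 1)).getD
            (line :: rest).length)
          = ((rest.findIdx? (fun l => pvIsupper l && decide (5 < l.length))).getD rest.length) + 1 := by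
        rw [if_neg (by simp [hu])]
        cases rest.findIdx? (fun l => pvIsupper l && decide (5 < l.length)) with
        | none => simp
        | some j => simp
      rw [htake, List.take_succ_cons]
      simp only [pvCollectB2, pvCollectB3, hu, Bool.false_eq_true, if_false]
      split_ifs with h1 h2
      · rfl
      · exact ih _ _
      · exact ih _ _

-- stage 3 → 4: stripping and dropping blank lines hoisted out
lemma pvP3 (ls : List (List Char)) (parts : List (List Char)) (t : Nat) :
    pvCollectB3 ls parts t
      = pvCollectB4 ((ls.map PySem.Chars.strip).filter (fun s => !s.isEmpty)) parts t := by
  induction ls generalizing parts t with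
  | nil => rfl
  | cons line rest ih =>
    rw [List.map_cons]
    by_cases hs : (PySem.Chars.strip line).isEmpty = true
    · rw [List.filter_cons_of_neg (by simp [hs])]
      simp only [pvCollectB3, hs]
      rw [if_neg (by simp)]
      exact ih _ _
    · rw [List.filter_cons_of_pos (by simp [hs])]
      simp only [pvCollectB3, pvCollectB4]
      rw [if_pos (by simp [hs])]
      split_ifs with h1
      · rfl
      · exact ih _ _

lemma pvCutIdx_shift (ps : List (List Char)) (t c : Nat) :
    pvCutIdx ps t c = c + pvCutIdx ps t 0 := by
  induction ps generalizing t c with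
  | nil => simp [pvCutIdx]
  | cons p rest ih =>
    simp only [pvCutIdx]
    by_cases h : 300 < t + p.length + 1
    · simp [h]
    · rw [if_neg h, if_neg h, ih _ (c + 1), ih _ 1]
      omega

-- stage 4 = a take at the prefix-length cut index
lemma pvP4 (ps : List (List Char)) (parts : List (List Char)) (t : Nat) :
    pvCollectB4 ps parts t = parts ++ ps.take (pvCutIdx ps t 0) := by
  induction ps generalizing parts t with
  | nil => simp [pvCollectB4, pvCutIdx]
  | cons s rest ih =>
    simp only [pvCollectB4, pvCutIdx]
    by_cases h : 300 < t + s.length + 1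
    · rw [if_pos h, if_pos h]
      simp
    · rw [if_neg h, if_neg h, ih, pvCutIdx_shift rest _ 1, Nat.add_comm 1 _,
        List.take_succ_cons]
      simp

-- proof-side name for B's pipeline (definitionally the body of extract_bio_alt's some-branch)
def pvPipeline (ls : List (List Char)) : List (List Char) :=
  let tail := ls.filter (fun l => !pvIsHeaderLine l)
  let stop := (tail.findIdx? (fun l => pvIsupper l && decide (5 < l.length))).getD tail.length
  let parts0 := ((tail.take stop).map PySem.Chars.strip).filter (fun s => !s.isEmpty)
  parts0.take (pvCutIdx parts0 0 0)

-- the full chain: A's collecting loop = B's staged pipeline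
lemma pvChain (ls : List (List Char)) :
    pvCollectB ls [] 0 = pvPipeline ls := by
  unfold pvPipeline
  rw [pvP1, pvP2, pvP3, pvP4]
  simp

lemma pvPipe_good (ls : List (List Char)) :
    ∀ p ∈ pvPipeline ls, pvGoodPart p := by
  unfold pvPipeline
  intro p hp
  have hp0 := List.mem_of_mem_take hp
  have hp1 := List.mem_filter.1 hp0
  obtain ⟨q, _, hq⟩ := List.mem_map.1 hp1.1
  refine ⟨by rw [← hq]; exact pvStrip_idem q, ?_⟩
  have := hp1.2
  simp only [Bool.not_eq_eq_eq_not, Bool.not_true] at this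
  simpa [List.isEmpty_iff] using this

-- the shared epilogue: fallback test and final strip/take, for any parts list with
-- pvLoopA lines false [] = pvConcatTS parts
lemma pvFinal (lines : List (List Char)) (parts : List (List Char))
    (hA : pvLoopA lines false [] = pvConcatTS parts)
    (hgood : ∀ p ∈ parts, pvGoodPart p) :
    String.ofList ((PySem.Chars.strip
        (if ((pvLoopA lines false []).isEmpty && decide (2 < lines.length)) = true
         then PySem.Chars.join [' '] (PySem.List.slice lines (some 2) (some 5))
         else pvLoopA lines false [])).take 500)
      = if (parts.isEmpty && decide (2 < lines.length)) = true then
          String.ofList ((PySem.Chars.strip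
            (PySem.Chars.join [' '] (PySem.List.slice lines (some 2) (some 5)))).take 500)
        else String.ofList ((PySem.Chars.join [' '] parts).take 500) := by
  rw [hA]
  by_cases hpe : parts.isEmpty = true
  · have hnil : parts = [] := List.isEmpty_iff.1 hpe
    subst hnil
    by_cases hl : 2 < lines.length
    · rw [if_pos (by simp [pvConcatTS, hl]), if_pos (by simp [hl])]
    · rw [if_neg (by simp [pvConcatTS, hl]), if_neg (by simp [hl])]
      rfl
  · rw [if_neg (by simp [pvConcatTS_empty_iff, hpe]), if_neg (by simp [hpe]),
      pvStrip_concatTS _ hgood]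

-- ===== VERDICT (by name: the statement is the Claim_ definition above) =====
theorem extract_bio_spec : Claim_equal_extract_bio := by
  intro text _
  show extract_bio text = extract_bio_alt text
  unfold extract_bio extract_bio_alt
  generalize PySem.Chars.splitOn text.toList ['\n'] = lines
  cases hf : lines.findIdx? pvIsHeaderLine with
  | none =>
    simp only [hf]
    exact pvFinal lines []
      (by rw [pvMain, hf])
      (by simp)
  | some i =>
    simp only [hf]
    exact pvFinal lines (pvPipeline (lines.drop (i + 1)))
      (by rw [pvMain, hf]
          show pvConcatTS (pvCollectB (lines.drop (i + 1)) [] 0) = _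
          rw [pvChain])
      (pvPipe_good _)
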